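-- pv_equiv track=rewrite | github.com/OTOYO1020/ChatDev_Intermediate | WareHouse/D_276__20250506134611/operations.py | calculate_operations
-- ===== SOURCE A (Python) =====
-- def reduce_value(value):
--     if value < 1:
--         raise ValueError("Value must be a positive integer.")
--     if value == 1:
--         return 0  # No operations needed for the value 1
--     operations = 0
--     # Reduce the value until it is not divisible by 2 or 3
--     while value % 2 == 0 or value % 3 == 0:
--         if value % 2 == 0:
--             value //= 2
--         elif value % 3 == 0:
--             value //= 3
--         operations += 1
--     # If the reduced value is greater than 1, find the next valid number
--     if value > 1:
--         while value % 2 == 0 or value % 3 == 0: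
--             value += 1  # Increment to find the next valid number
--             operations += 1
--             if operations > 100:  # Safety check to prevent infinite loop
--                 raise RuntimeError("Exceeded maximum operations to find a valid number.")
--     return operations  # Return only the operations count
--
-- def calculate_operations(numbers):
--     total_operations = 0
--     reduced_values = []
--     # Validate input numbers to ensure they are positive integers
--     for number in numbers:
--         if number <= 0:
--             return -1  # Invalid input, must be positive integers
--     for number in numbers:
--         operations = reduce_value(number)
--         total_operations += operations
--         # Store the reduced value instead of the original number
--         reduced_value = number
--         while reduced_value % 2 == 0 or reduced_value % 3 == 0:
--             if reduced_value % 2 == 0: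
--                 reduced_value //= 2
--             elif reduced_value % 3 == 0:
--                 reduced_value //= 3
--         reduced_values.append(reduced_value)  # Store the reduced value for comparison
--     # Check if all reduced values can be the same
--     if len(set(reduced_values)) > 1:
--         return -1  # Cannot reduce to a common value
--     return total_operations
-- ===== SOURCE B (Python) =====
-- def strip(v, p):
--     # (w, e) with v == w * p**e and p does not divide w, by valuation halving:
--     # recurse on p*p (strips pairs of p), then at most one extra factor of p remains
--     if v % p:
--         return v, 0
--     w, e = strip(v, p * p)
--     if w % p == 0:
--         return w // p, 2 * e + 1
--     return w, 2 * e
--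
-- def calculate_operations(numbers):
--     if any(n <= 0 for n in numbers):
--         return -1  # invalid input, must be positive integers
--     total = 0
--     common = None
--     for n in numbers:
--         c2, e2 = strip(n, 2)
--         core, e3 = strip(c2, 3)
--         if common is None:
--             common = core
--         elif core != common:
--             return -1
--         total += e2 + e3
--     return total
-- ===== Notes on version B (the rewrite author's own statement) =====
-- stated objective: alternative
-- what changed: B replaces A's one-factor-at-a-time reduction loops (reduce_value plus a duplicated interleaved while loop, an accumulated list and a set-cardinality check) by a recursive valuation-halving strip(v,p) that recurses on p*p to strip pairs of factors at once (exponent rebuilt as 2*e or 2*e+1), applied to p=2 then p=3 in a single pass with a running common-core variable and early exit.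
import Mathlib
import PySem

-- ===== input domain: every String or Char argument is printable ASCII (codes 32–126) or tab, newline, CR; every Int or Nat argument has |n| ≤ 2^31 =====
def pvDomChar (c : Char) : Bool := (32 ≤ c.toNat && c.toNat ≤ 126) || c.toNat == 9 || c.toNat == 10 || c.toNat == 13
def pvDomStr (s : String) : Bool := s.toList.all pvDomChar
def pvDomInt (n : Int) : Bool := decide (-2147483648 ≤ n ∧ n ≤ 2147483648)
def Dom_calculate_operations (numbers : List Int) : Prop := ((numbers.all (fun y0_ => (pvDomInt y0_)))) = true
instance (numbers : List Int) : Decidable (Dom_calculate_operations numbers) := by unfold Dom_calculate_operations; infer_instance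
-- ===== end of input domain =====

-- B replaces A's one-factor-at-a-time reduction loops (reduce_value plus a duplicated interleaved
-- reduction, an accumulated list and a set-cardinality check) by a recursive valuation-halving
-- strip(v,p) recursing on p*p, applied to p=2 then p=3 in a single pass with a running common-core
-- variable and early exit (objective: alternative). Equivalence of return values.

-- ===== PORT A =====
-- the first validation for-loop (early return -1)
def validateA : List Int → Bool
  | [] => false
  | n :: t => if n ≤ 0 then true else validateA t

-- the while loop of reduce_value, tracking (value, operations), with a fuel counter making the
-- recursion structural; fuel v.toNat is enough because the value strictly shrinks each iteration,
-- so the wrapper rvLoop computes exactly the Python loop (which only runs on positive values)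
def rvLoopF : Nat → Int → Int × Int
  | 0, v => (v, 0)
  | f + 1, v =>
    if 1 ≤ v ∧ (PySem.Int.mod v 2 = 0 ∨ PySem.Int.mod v 3 = 0) then
      let v' := if PySem.Int.mod v 2 = 0 then PySem.Int.floordiv v 2 else PySem.Int.floordiv v 3
      let p := rvLoopF f v'
      (p.1, p.2 + 1)
    else (v, 0)

def rvLoop (v : Int) : Int × Int := rvLoopF v.toNat v

-- the second while of reduce_value ('find the next valid number'); fuel = the 100-operation safety
-- bound; fuel 0 is where Python raises RuntimeError (unreachable: the entry condition is false)
def findNext (v ops : Int) : Nat → Int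
  | 0 => ops
  | fuel + 1 =>
    if PySem.Int.mod v 2 = 0 ∨ PySem.Int.mod v 3 = 0 then findNext (v + 1) (ops + 1) fuel else ops

def reduce_value (value : Int) : Int :=
  if value < 1 then 0  -- Python raises ValueError here; unreachable from calculate_operations (validated)
  else if value = 1 then 0
  else
    let p := rvLoop value
    if p.1 > 1 then findNext p.1 p.2 101 else p.2

-- the inline while of calculate_operations reducing reduced_value (value only; same fuel scheme)
def redLoopF : Nat → Int → Int
  | 0, v => v
  | f + 1, v =>
    if 1 ≤ v ∧ (PySem.Int.mod v 2 = 0 ∨ PySem.Int.mod v 3 = 0) then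
      redLoopF f (if PySem.Int.mod v 2 = 0 then PySem.Int.floordiv v 2 else PySem.Int.floordiv v 3)
    else v

def redLoop (v : Int) : Int := redLoopF v.toNat v

-- the second for-loop, accumulating total_operations and reduced_values
def loopA : List Int → Int → List Int → Int × List Int
  | [], total, acc => (total, acc)
  | n :: t, total, acc => loopA t (total + reduce_value n) (acc ++ [redLoop n])

def calculate_operations (numbers : List Int) : Int :=
  if validateA numbers then -1
  else
    let p := loopA numbers 0 []
    if 1 < (PySem.Set.ofList p.2).length then -1 else p.1

-- ===== PORT B =====
-- Source B's strip(v, p): valuation halving, recursing on p*p.  The recursion is made structural with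
-- a fuel counter; fuel v.toNat + 1 suffices for every call B makes (v ≥ 1: p at least doubles each
-- level, so the depth is ≤ log2 v + 1 ≤ v.toNat + 1); fuel exhaustion is never reached there.
def stripF : Nat → Int → Int → Int × Int
  | 0, v, _ => (v, 0)
  | f + 1, v, p =>
    if PySem.Int.mod v p ≠ 0 then (v, 0)
    else
      let r := stripF f v (p * p)
      if PySem.Int.mod r.1 p = 0 then (PySem.Int.floordiv r.1 p, 2 * r.2 + 1)
      else (r.1, 2 * r.2)

def stripB (v p : Int) : Int × Int := stripF (v.toNat + 1) v p

-- the single pass: running total and the common core (None before the first element)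
def loopB : List Int → Int → Option Int → Int
  | [], total, _ => total
  | n :: t, total, common =>
    let p2 := stripB n 2
    let p3 := stripB p2.1 3
    match common with
    | none => loopB t (total + (p2.2 + p3.2)) (some p3.1)
    | some c => if p3.1 ≠ c then -1 else loopB t (total + (p2.2 + p3.2)) (some c)

def calculate_operations_alt (numbers : List Int) : Int :=
  if numbers.any (fun n => n ≤ 0) then -1
  else loopB numbers 0 none

-- ===== PRECONDITION & SPEC =====
def Spec_calculate_operations (numbers : List Int) (out : Int) : Prop := out = calculate_operations_alt numbers
instance (numbers : List Int) (out : Int) : Decidable (Spec_calculate_operations numbers out) := by unfold Spec_calculate_operations; infer_instance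

-- ===== CLAIM (what is proved, stated in full; the proofs are below) =====
def Claim_equal_calculate_operations : Prop := ∀ (numbers : List Int), Dom_calculate_operations numbers → Spec_calculate_operations numbers (calculate_operations numbers)

-- ===== LEMMAS AND PROOFS =====
-- bridges to Lean's % and / (all divisors here are positive)
theorem pvModP (p a : Int) (hp : 0 < p) : PySem.Int.mod a p = a % p := PySem.Int.mod_eq_emod_of_pos hp
theorem pvDivP (p a : Int) (hp : 0 < p) : PySem.Int.floordiv a p = a / p := PySem.Int.floordiv_eq_ediv_of_pos hp
theorem pvMod2 (a : Int) : PySem.Int.mod a 2 = a % 2 := pvModP 2 a (by norm_num)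
theorem pvMod3 (a : Int) : PySem.Int.mod a 3 = a % 3 := pvModP 3 a (by norm_num)
theorem pvDiv2 (a : Int) : PySem.Int.floordiv a 2 = a / 2 := pvDivP 2 a (by norm_num)
theorem pvDiv3 (a : Int) : PySem.Int.floordiv a 3 = a / 3 := pvDivP 3 a (by norm_num)

-- proof-only sequential one-factor strips (A's loops are proved equal to these, and B's stripB is
-- proved equal to them through the unique factorisation v = core * p^e)
def strip2F : Nat → Int → Int × Int
  | 0, v => (v, 0)
  | f + 1, v =>
    if 1 ≤ v ∧ PySem.Int.mod v 2 = 0 then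
      let p := strip2F f (PySem.Int.floordiv v 2)
      (p.1, p.2 + 1)
    else (v, 0)

def strip2 (v : Int) : Int × Int := strip2F v.toNat v

def strip3F : Nat → Int → Int × Int
  | 0, v => (v, 0)
  | f + 1, v =>
    if 1 ≤ v ∧ PySem.Int.mod v 3 = 0 then
      let p := strip3F f (PySem.Int.floordiv v 3)
      (p.1, p.2 + 1)
    else (v, 0)

def strip3 (v : Int) : Int × Int := strip3F v.toNat v

def coreOf (n : Int) : Int := (strip3 (strip2 n).1).1
def opsOf (n : Int) : Int := (strip2 n).2 + (strip3 (strip2 n).1).2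

-- any sufficient fuel computes the same result (the value shrinks strictly each iteration)
theorem strip2F_congr (f : Nat) : ∀ (f' : Nat) (v : Int), v.toNat ≤ f → v.toNat ≤ f' →
    strip2F f v = strip2F f' v := by
  induction f with
  | zero =>
    intro f' v h h'
    have hv : ¬ (1 ≤ v ∧ PySem.Int.mod v 2 = 0) := fun hc => by have := hc.1; omega
    cases f' with
    | zero => rfl
    | succ g => simp only [strip2F, if_neg hv]
  | succ g ih =>
    intro f' v h h'
    cases f' with
    | zero =>
      have hv : ¬ (1 ≤ v ∧ PySem.Int.mod v 2 = 0) := fun hc => by have := hc.1; omega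
      simp only [strip2F, if_neg hv]
    | succ g' =>
      by_cases hc : 1 ≤ v ∧ PySem.Int.mod v 2 = 0
      · have h2 : v % 2 = 0 := by rw [← pvMod2]; exact hc.2
        have h1 := hc.1
        have hlt : (PySem.Int.floordiv v 2).toNat < v.toNat := by rw [pvDiv2]; omega
        simp only [strip2F, if_pos hc]
        rw [ih g' (PySem.Int.floordiv v 2) (by omega) (by omega)]
      · simp only [strip2F, if_neg hc]

theorem strip3F_congr (f : Nat) : ∀ (f' : Nat) (v : Int), v.toNat ≤ f → v.toNat ≤ f' →
    strip3F f v = strip3F f' v := by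
  induction f with
  | zero =>
    intro f' v h h'
    have hv : ¬ (1 ≤ v ∧ PySem.Int.mod v 3 = 0) := fun hc => by have := hc.1; omega
    cases f' with
    | zero => rfl
    | succ g => simp only [strip3F, if_neg hv]
  | succ g ih =>
    intro f' v h h'
    cases f' with
    | zero =>
      have hv : ¬ (1 ≤ v ∧ PySem.Int.mod v 3 = 0) := fun hc => by have := hc.1; omega
      simp only [strip3F, if_neg hv]
    | succ g' =>
      by_cases hc : 1 ≤ v ∧ PySem.Int.mod v 3 = 0
      · have h3 : v % 3 = 0 := by rw [← pvMod3]; exact hc.2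
        have h1 := hc.1
        have hlt : (PySem.Int.floordiv v 3).toNat < v.toNat := by rw [pvDiv3]; omega
        simp only [strip3F, if_pos hc]
        rw [ih g' (PySem.Int.floordiv v 3) (by omega) (by omega)]
      · simp only [strip3F, if_neg hc]

theorem rvLoopF_congr (f : Nat) : ∀ (f' : Nat) (v : Int), v.toNat ≤ f → v.toNat ≤ f' →
    rvLoopF f v = rvLoopF f' v := by
  induction f with
  | zero =>
    intro f' v h h'
    have hv : ¬ (1 ≤ v ∧ (PySem.Int.mod v 2 = 0 ∨ PySem.Int.mod v 3 = 0)) :=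
      fun hc => by have := hc.1; omega
    cases f' with
    | zero => rfl
    | succ g => simp only [rvLoopF, if_neg hv]
  | succ g ih =>
    intro f' v h h'
    cases f' with
    | zero =>
      have hv : ¬ (1 ≤ v ∧ (PySem.Int.mod v 2 = 0 ∨ PySem.Int.mod v 3 = 0)) :=
        fun hc => by have := hc.1; omega
      simp only [rvLoopF, if_neg hv]
    | succ g' =>
      by_cases hc : 1 ≤ v ∧ (PySem.Int.mod v 2 = 0 ∨ PySem.Int.mod v 3 = 0)
      · have h1 := hc.1
        have hlt : (if PySem.Int.mod v 2 = 0 then PySem.Int.floordiv v 2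
            else PySem.Int.floordiv v 3).toNat < v.toNat := by
          rcases hc.2 with h2 | h3
          · rw [if_pos h2, pvDiv2]; rw [pvMod2] at h2; omega
          · by_cases h2 : PySem.Int.mod v 2 = 0
            · rw [if_pos h2, pvDiv2]; rw [pvMod2] at h2; omega
            · rw [if_neg h2, pvDiv3]; rw [pvMod3] at h3; omega
        simp only [rvLoopF, if_pos hc]
        rw [ih g' _ (by omega) (by omega)]
      · simp only [rvLoopF, if_neg hc]

theorem redLoopF_congr (f : Nat) : ∀ (f' : Nat) (v : Int), v.toNat ≤ f → v.toNat ≤ f' →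
    redLoopF f v = redLoopF f' v := by
  induction f with
  | zero =>
    intro f' v h h'
    have hv : ¬ (1 ≤ v ∧ (PySem.Int.mod v 2 = 0 ∨ PySem.Int.mod v 3 = 0)) :=
      fun hc => by have := hc.1; omega
    cases f' with
    | zero => rfl
    | succ g => simp only [redLoopF, if_neg hv]
  | succ g ih =>
    intro f' v h h'
    cases f' with
    | zero =>
      have hv : ¬ (1 ≤ v ∧ (PySem.Int.mod v 2 = 0 ∨ PySem.Int.mod v 3 = 0)) :=
        fun hc => by have := hc.1; omega
      simp only [redLoopF, if_neg hv]
    | succ g' =>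
      by_cases hc : 1 ≤ v ∧ (PySem.Int.mod v 2 = 0 ∨ PySem.Int.mod v 3 = 0)
      · have h1 := hc.1
        have hlt : (if PySem.Int.mod v 2 = 0 then PySem.Int.floordiv v 2
            else PySem.Int.floordiv v 3).toNat < v.toNat := by
          rcases hc.2 with h2 | h3
          · rw [if_pos h2, pvDiv2]; rw [pvMod2] at h2; omega
          · by_cases h2 : PySem.Int.mod v 2 = 0
            · rw [if_pos h2, pvDiv2]; rw [pvMod2] at h2; omega
            · rw [if_neg h2, pvDiv3]; rw [pvMod3] at h3; omega
        simp only [redLoopF, if_pos hc]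
        rw [ih g' _ (by omega) (by omega)]
      · simp only [redLoopF, if_neg hc]

-- one-step / exit equations of the loops
theorem strip2_step (v : Int) (h : 1 ≤ v ∧ PySem.Int.mod v 2 = 0) :
    strip2 v = ((strip2 (PySem.Int.floordiv v 2)).1, (strip2 (PySem.Int.floordiv v 2)).2 + 1) := by
  have h2 : v % 2 = 0 := by rw [← pvMod2]; exact h.2
  have h1 := h.1
  have hv : v.toNat = (v.toNat - 1) + 1 := by omega
  unfold strip2
  rw [hv]
  simp only [strip2F, if_pos h]
  rw [strip2F_congr (v.toNat - 1) (PySem.Int.floordiv v 2).toNat (PySem.Int.floordiv v 2)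
    (by rw [pvDiv2]; omega) (le_refl _)]

theorem strip2_end (v : Int) (h : ¬ (1 ≤ v ∧ PySem.Int.mod v 2 = 0)) : strip2 v = (v, 0) := by
  unfold strip2
  cases v.toNat with
  | zero => rfl
  | succ g => simp only [strip2F, if_neg h]

theorem strip3_step (v : Int) (h : 1 ≤ v ∧ PySem.Int.mod v 3 = 0) :
    strip3 v = ((strip3 (PySem.Int.floordiv v 3)).1, (strip3 (PySem.Int.floordiv v 3)).2 + 1) := by
  have h3 : v % 3 = 0 := by rw [← pvMod3]; exact h.2
  have h1 := h.1
  have hv : v.toNat = (v.toNat - 1) + 1 := by omega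
  unfold strip3
  rw [hv]
  simp only [strip3F, if_pos h]
  rw [strip3F_congr (v.toNat - 1) (PySem.Int.floordiv v 3).toNat (PySem.Int.floordiv v 3)
    (by rw [pvDiv3]; omega) (le_refl _)]

theorem strip3_end (v : Int) (h : ¬ (1 ≤ v ∧ PySem.Int.mod v 3 = 0)) : strip3 v = (v, 0) := by
  unfold strip3
  cases v.toNat with
  | zero => rfl
  | succ g => simp only [strip3F, if_neg h]

theorem rvLoop_step (v : Int) (h : 1 ≤ v ∧ (PySem.Int.mod v 2 = 0 ∨ PySem.Int.mod v 3 = 0)) :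
    rvLoop v = ((rvLoop (if PySem.Int.mod v 2 = 0 then PySem.Int.floordiv v 2 else PySem.Int.floordiv v 3)).1,
                (rvLoop (if PySem.Int.mod v 2 = 0 then PySem.Int.floordiv v 2 else PySem.Int.floordiv v 3)).2 + 1) := by
  have h1 := h.1
  have hlt : (if PySem.Int.mod v 2 = 0 then PySem.Int.floordiv v 2
      else PySem.Int.floordiv v 3).toNat < v.toNat := by
    rcases h.2 with h2 | h3
    · rw [if_pos h2, pvDiv2]; rw [pvMod2] at h2; omega
    · by_cases h2 : PySem.Int.mod v 2 = 0
      · rw [if_pos h2, pvDiv2]; rw [pvMod2] at h2; omega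
      · rw [if_neg h2, pvDiv3]; rw [pvMod3] at h3; omega
  have hv : v.toNat = (v.toNat - 1) + 1 := by omega
  unfold rvLoop
  rw [hv]
  simp only [rvLoopF, if_pos h]
  rw [rvLoopF_congr (v.toNat - 1)
    (if PySem.Int.mod v 2 = 0 then PySem.Int.floordiv v 2 else PySem.Int.floordiv v 3).toNat _
    (by omega) (le_refl _)]

theorem rvLoop_end (v : Int) (h : ¬ (1 ≤ v ∧ (PySem.Int.mod v 2 = 0 ∨ PySem.Int.mod v 3 = 0))) :
    rvLoop v = (v, 0) := by
  unfold rvLoop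
  cases v.toNat with
  | zero => rfl
  | succ g => simp only [rvLoopF, if_neg h]

theorem redLoop_step (v : Int) (h : 1 ≤ v ∧ (PySem.Int.mod v 2 = 0 ∨ PySem.Int.mod v 3 = 0)) :
    redLoop v = redLoop (if PySem.Int.mod v 2 = 0 then PySem.Int.floordiv v 2 else PySem.Int.floordiv v 3) := by
  have h1 := h.1
  have hlt : (if PySem.Int.mod v 2 = 0 then PySem.Int.floordiv v 2
      else PySem.Int.floordiv v 3).toNat < v.toNat := by
    rcases h.2 with h2 | h3
    · rw [if_pos h2, pvDiv2]; rw [pvMod2] at h2; omega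
    · by_cases h2 : PySem.Int.mod v 2 = 0
      · rw [if_pos h2, pvDiv2]; rw [pvMod2] at h2; omega
      · rw [if_neg h2, pvDiv3]; rw [pvMod3] at h3; omega
  have hv : v.toNat = (v.toNat - 1) + 1 := by omega
  unfold redLoop
  rw [hv]
  simp only [redLoopF, if_pos h]
  rw [redLoopF_congr (v.toNat - 1)
    (if PySem.Int.mod v 2 = 0 then PySem.Int.floordiv v 2 else PySem.Int.floordiv v 3).toNat _
    (by omega) (le_refl _)]

theorem redLoop_end (v : Int) (h : ¬ (1 ≤ v ∧ (PySem.Int.mod v 2 = 0 ∨ PySem.Int.mod v 3 = 0))) :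
    redLoop v = v := by
  unfold redLoop
  cases v.toNat with
  | zero => rfl
  | succ g => simp only [redLoopF, if_neg h]

theorem validateA_eq_any (l : List Int) : validateA l = l.any (fun n => n ≤ 0) := by
  induction l with
  | nil => rfl
  | cons n t ih => by_cases h : n ≤ 0 <;> simp [validateA, h, ih]

theorem strip2_spec (v : Int) (hv : 1 ≤ v) :
    1 ≤ (strip2 v).1 ∧ (strip2 v).1 % 2 ≠ 0 := by
  by_cases h : 1 ≤ v ∧ PySem.Int.mod v 2 = 0
  · have h2 : v % 2 = 0 := by rw [← pvMod2]; exact h.2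
    rw [strip2_step v h]
    exact strip2_spec (PySem.Int.floordiv v 2) (by rw [pvDiv2]; omega)
  · rw [strip2_end v h]
    exact ⟨hv, fun hc => h ⟨hv, by rw [pvMod2]; exact hc⟩⟩
termination_by v.toNat
decreasing_by
  have h2 := h.2
  rw [pvMod2] at h2
  simp only [pvDiv2]
  omega

theorem strip3_spec (v : Int) (hv : 1 ≤ v) :
    1 ≤ (strip3 v).1 ∧ (strip3 v).1 % 3 ≠ 0 := by
  by_cases h : 1 ≤ v ∧ PySem.Int.mod v 3 = 0
  · have h3 : v % 3 = 0 := by rw [← pvMod3]; exact h.2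
    rw [strip3_step v h]
    exact strip3_spec (PySem.Int.floordiv v 3) (by rw [pvDiv3]; omega)
  · rw [strip3_end v h]
    exact ⟨hv, fun hc => h ⟨hv, by rw [pvMod3]; exact hc⟩⟩
termination_by v.toNat
decreasing_by
  have h3 := h.2
  rw [pvMod3] at h3
  simp only [pvDiv3]
  omega

theorem strip3_odd (v : Int) (hv : 1 ≤ v) (ho : v % 2 ≠ 0) : (strip3 v).1 % 2 ≠ 0 := by
  by_cases h : 1 ≤ v ∧ PySem.Int.mod v 3 = 0
  · have h3 : v % 3 = 0 := by rw [← pvMod3]; exact h.2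
    rw [strip3_step v h]
    exact strip3_odd (PySem.Int.floordiv v 3) (by rw [pvDiv3]; omega) (by rw [pvDiv3]; omega)
  · rw [strip3_end v h]
    exact ho
termination_by v.toNat
decreasing_by
  have h3 := h.2
  rw [pvMod3] at h3
  simp only [pvDiv3]
  omega

theorem rvLoop_eq (v : Int) (hv : 1 ≤ v) :
    rvLoop v = ((strip3 (strip2 v).1).1, (strip2 v).2 + (strip3 (strip2 v).1).2) := by
  by_cases he : PySem.Int.mod v 2 = 0
  · have he' : v % 2 = 0 := by rw [← pvMod2]; exact he
    rw [rvLoop_step v ⟨hv, Or.inl he⟩, if_pos he,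
      rvLoop_eq (PySem.Int.floordiv v 2) (by rw [pvDiv2]; omega),
      strip2_step v ⟨hv, he⟩]
    simp only [Prod.mk.injEq]
    exact ⟨trivial, by ring⟩
  · by_cases h3 : PySem.Int.mod v 3 = 0
    · have he' : v % 2 ≠ 0 := fun hc => he (by rw [pvMod2]; exact hc)
      have h3' : v % 3 = 0 := by rw [← pvMod3]; exact h3
      have hnd : ¬ (1 ≤ PySem.Int.floordiv v 3 ∧ PySem.Int.mod (PySem.Int.floordiv v 3) 2 = 0) := by
        rw [pvDiv3]; intro hc; rw [pvMod2] at hc; omega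
      rw [rvLoop_step v ⟨hv, Or.inr h3⟩, if_neg he,
        rvLoop_eq (PySem.Int.floordiv v 3) (by rw [pvDiv3]; omega),
        strip2_end (PySem.Int.floordiv v 3) hnd,
        strip2_end v (fun hc => he hc.2),
        strip3_step v ⟨hv, h3⟩]
      simp only [Prod.mk.injEq]
      exact ⟨trivial, by ring⟩
    · have hno : ¬ (1 ≤ v ∧ (PySem.Int.mod v 2 = 0 ∨ PySem.Int.mod v 3 = 0)) :=
        fun hc => hc.2.elim he h3
      rw [rvLoop_end v hno, strip2_end v (fun hc => he hc.2), strip3_end v (fun hc => h3 hc.2)]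
      rfl
termination_by v.toNat
decreasing_by
  all_goals simp only [pvDiv2, pvDiv3]
  · omega
  · omega

theorem redLoop_eq_rvLoop (v : Int) : redLoop v = (rvLoop v).1 := by
  by_cases h : 1 ≤ v ∧ (PySem.Int.mod v 2 = 0 ∨ PySem.Int.mod v 3 = 0)
  · rw [redLoop_step v h, rvLoop_step v h,
      redLoop_eq_rvLoop (if PySem.Int.mod v 2 = 0 then PySem.Int.floordiv v 2 else PySem.Int.floordiv v 3)]
  · rw [redLoop_end v h, rvLoop_end v h]
termination_by v.toNat
decreasing_by
  obtain ⟨h1, h2⟩ := h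
  simp only [pvMod2, pvMod3, pvDiv2, pvDiv3] at *
  split_ifs <;> omega

theorem redLoop_eq (v : Int) (hv : 1 ≤ v) : redLoop v = coreOf v := by
  rw [redLoop_eq_rvLoop, rvLoop_eq v hv, coreOf]

theorem reduce_value_eq (v : Int) (hv : 1 ≤ v) : reduce_value v = opsOf v := by
  by_cases h1 : v = 1
  · subst h1
    have hred : reduce_value 1 = 0 := by rw [reduce_value, if_neg (by omega), if_pos rfl]
    have hs2 : strip2 1 = (1, 0) := strip2_end 1 (by rw [pvMod2]; omega)
    have hs3 : strip3 1 = (1, 0) := strip3_end 1 (by rw [pvMod3]; omega)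
    rw [hred, opsOf, hs2]
    rw [show ((1:Int), (0:Int)).1 = (1:Int) from rfl, hs3]
    rfl
  · have hred : reduce_value v =
        (if (rvLoop v).1 > 1 then findNext (rvLoop v).1 (rvLoop v).2 101 else (rvLoop v).2) := by
      rw [reduce_value, if_neg (by omega), if_neg h1]
    have hs2 := strip2_spec v hv
    have hs3 := strip3_spec (strip2 v).1 hs2.1
    have hodd := strip3_odd (strip2 v).1 hs2.1 hs2.2
    rw [hred, rvLoop_eq v hv]
    show (if (strip3 (strip2 v).1).1 > 1
        then findNext (strip3 (strip2 v).1).1 ((strip2 v).2 + (strip3 (strip2 v).1).2) 101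
        else (strip2 v).2 + (strip3 (strip2 v).1).2) = opsOf v
    by_cases hgt : (strip3 (strip2 v).1).1 > 1
    · rw [if_pos hgt]
      have hstep : findNext (strip3 (strip2 v).1).1 ((strip2 v).2 + (strip3 (strip2 v).1).2) 101 =
          if PySem.Int.mod (strip3 (strip2 v).1).1 2 = 0 ∨ PySem.Int.mod (strip3 (strip2 v).1).1 3 = 0
          then findNext ((strip3 (strip2 v).1).1 + 1) ((strip2 v).2 + (strip3 (strip2 v).1).2 + 1) 100
          else (strip2 v).2 + (strip3 (strip2 v).1).2 := rfl
      rw [hstep, if_neg (by rw [pvMod2, pvMod3]; omega)]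
      rfl
    · rw [if_neg hgt]
      rfl

theorem loopA_eq (t : List Int) : ∀ (total : Int) (acc : List Int),
    loopA t total acc = (total + (t.map reduce_value).sum, acc ++ t.map redLoop) := by
  induction t with
  | nil => intro total acc; simp [loopA]
  | cons n t ih =>
    intro total acc
    rw [loopA, ih]
    simp [add_assoc]

-- ----- B side: product identities for the sequential strips -----
theorem strip2_prod (v : Int) (hv : 1 ≤ v) :
    v = (strip2 v).1 * 2 ^ (strip2 v).2.toNat ∧ 0 ≤ (strip2 v).2 := by
  by_cases h : 1 ≤ v ∧ PySem.Int.mod v 2 = 0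
  · have h2 : v % 2 = 0 := by rw [← pvMod2]; exact h.2
    have ih := strip2_prod (PySem.Int.floordiv v 2) (by rw [pvDiv2]; omega)
    rw [strip2_step v h]
    refine ⟨?_, show (0:Int) ≤ ((strip2 (PySem.Int.floordiv v 2)).1, (strip2 (PySem.Int.floordiv v 2)).2 + 1).2 from by have := ih.2; simp only []; omega⟩
    have ht : ((strip2 (PySem.Int.floordiv v 2)).2 + 1).toNat
        = (strip2 (PySem.Int.floordiv v 2)).2.toNat + 1 := by have := ih.2; omega
    show v = (strip2 (PySem.Int.floordiv v 2)).1 * 2 ^ ((strip2 (PySem.Int.floordiv v 2)).2 + 1).toNat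
    rw [ht, pow_succ, ← mul_assoc, ← ih.1, pvDiv2]
    omega
  · rw [strip2_end v h]
    exact ⟨by simp, le_refl 0⟩
termination_by v.toNat
decreasing_by
  have h2 := h.2
  rw [pvMod2] at h2
  simp only [pvDiv2]
  omega

theorem strip3_prod (v : Int) (hv : 1 ≤ v) :
    v = (strip3 v).1 * 3 ^ (strip3 v).2.toNat ∧ 0 ≤ (strip3 v).2 := by
  by_cases h : 1 ≤ v ∧ PySem.Int.mod v 3 = 0
  · have h3 : v % 3 = 0 := by rw [← pvMod3]; exact h.2
    have ih := strip3_prod (PySem.Int.floordiv v 3) (by rw [pvDiv3]; omega)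
    rw [strip3_step v h]
    refine ⟨?_, show (0:Int) ≤ ((strip3 (PySem.Int.floordiv v 3)).1, (strip3 (PySem.Int.floordiv v 3)).2 + 1).2 from by have := ih.2; simp only []; omega⟩
    have ht : ((strip3 (PySem.Int.floordiv v 3)).2 + 1).toNat
        = (strip3 (PySem.Int.floordiv v 3)).2.toNat + 1 := by have := ih.2; omega
    show v = (strip3 (PySem.Int.floordiv v 3)).1 * 3 ^ ((strip3 (PySem.Int.floordiv v 3)).2 + 1).toNat
    rw [ht, pow_succ, ← mul_assoc, ← ih.1, pvDiv3]
    omega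
  · rw [strip3_end v h]
    exact ⟨by simp, le_refl 0⟩
termination_by v.toNat
decreasing_by
  have h3 := h.2
  rw [pvMod3] at h3
  simp only [pvDiv3]
  omega

-- ----- fuel-independence and step equation of B's stripF -----
theorem stripF_congr (f : Nat) : ∀ (f' : Nat) (v p : Int), 1 ≤ v → 2 ≤ p →
    v.toNat + 1 - p.toNat ≤ f → v.toNat + 1 - p.toNat ≤ f' → stripF f v p = stripF f' v p := by
  induction f with
  | zero =>
    intro f' v p hv hp h h'
    have hpv : v < p := by omega
    have hm : PySem.Int.mod v p = v := by
      rw [pvModP p v (by omega)]; exact Int.emod_eq_of_lt (by omega) hpv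
    have hne : PySem.Int.mod v p ≠ 0 := by rw [hm]; omega
    cases f' with
    | zero => rfl
    | succ g => simp only [stripF, if_pos hne]
  | succ g ih =>
    intro f' v p hv hp h h'
    cases f' with
    | zero =>
      have hpv : v < p := by omega
      have hm : PySem.Int.mod v p = v := by
        rw [pvModP p v (by omega)]; exact Int.emod_eq_of_lt (by omega) hpv
      have hne : PySem.Int.mod v p ≠ 0 := by rw [hm]; omega
      simp only [stripF, if_pos hne]
    | succ g' =>
      by_cases hm : PySem.Int.mod v p = 0
      · have hdvd : p ∣ v := by
          rw [pvModP p v (by omega)] at hm; exact Int.dvd_of_emod_eq_zero hm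
        have hple : p ≤ v := Int.le_of_dvd (by omega) hdvd
        have hq2 : (p * p).toNat = p.toNat * p.toNat := by
          rw [Int.toNat_mul] <;> omega
        have hgrow : p.toNat + 2 ≤ p.toNat * p.toNat := by nlinarith [Int.toNat_of_nonneg (show (0:Int) ≤ p by omega), show 2 ≤ p.toNat by omega]
        have hple' : p.toNat ≤ v.toNat := by omega
        simp only [stripF, if_neg (not_not_intro hm)]
        rw [ih g' v (p * p) hv (by nlinarith) (by omega) (by omega)]
      · simp only [stripF, if_pos hm]

theorem stripB_step (v p : Int) (hv : 1 ≤ v) (hp : 2 ≤ p) :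
    stripB v p =
      if PySem.Int.mod v p ≠ 0 then (v, 0)
      else
        if PySem.Int.mod (stripB v (p * p)).1 p = 0 then
          (PySem.Int.floordiv (stripB v (p * p)).1 p, 2 * (stripB v (p * p)).2 + 1)
        else ((stripB v (p * p)).1, 2 * (stripB v (p * p)).2) := by
  by_cases hm : PySem.Int.mod v p = 0
  · have hdvd : p ∣ v := by
      rw [pvModP p v (by omega)] at hm; exact Int.dvd_of_emod_eq_zero hm
    have hple : p ≤ v := Int.le_of_dvd (by omega) hdvd
    have hq2 : (p * p).toNat = p.toNat * p.toNat := by rw [Int.toNat_mul] <;> omega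
    have hgrow : p.toNat + 2 ≤ p.toNat * p.toNat := by nlinarith [Int.toNat_of_nonneg (show (0:Int) ≤ p by omega), show 2 ≤ p.toNat by omega]
    have hple' : p.toNat ≤ v.toNat := by omega
    show stripF (v.toNat + 1) v p = _
    simp only [stripF, if_neg (not_not_intro hm)]
    rw [stripF_congr v.toNat (v.toNat + 1) v (p * p) hv (by nlinarith) (by omega) (by omega)]
    rfl
  · show stripF (v.toNat + 1) v p = _
    simp only [stripF, if_pos hm]

-- characterisation of stripB: it returns THE factorisation v = core * p^e with p ∤ core
theorem stripB_char (v p : Int) (hv : 1 ≤ v) (hp : 2 ≤ p) :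
    v = (stripB v p).1 * p ^ (stripB v p).2.toNat ∧ ¬ p ∣ (stripB v p).1 ∧
      1 ≤ (stripB v p).1 ∧ 0 ≤ (stripB v p).2 := by
  by_cases hm : PySem.Int.mod v p = 0
  · have hdvd : p ∣ v := by
      rw [pvModP p v (by omega)] at hm; exact Int.dvd_of_emod_eq_zero hm
    have hple : p ≤ v := Int.le_of_dvd (by omega) hdvd
    have ih := stripB_char v (p * p) hv (by nlinarith)
    obtain ⟨hprod, hnd, hpos1, hnn⟩ := ih
    rw [stripB_step v p hv hp]
    simp only [if_neg (not_not_intro hm)]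
    by_cases hm2 : PySem.Int.mod (stripB v (p * p)).1 p = 0
    · simp only [if_pos hm2]
      have hdvd2 : p ∣ (stripB v (p * p)).1 := by
        rw [pvModP p _ (by omega)] at hm2; exact Int.dvd_of_emod_eq_zero hm2
      obtain ⟨q, hq⟩ := hdvd2
      have hfd : PySem.Int.floordiv (stripB v (p * p)).1 p = q := by
        rw [pvDivP p _ (by omega), hq, Int.mul_ediv_cancel_left q (by omega)]
      have hq1 : 1 ≤ q := by nlinarith
      refine ⟨?_, ?_, by rw [hfd]; exact hq1, by omega⟩
      · have ht : (2 * (stripB v (p * p)).2 + 1).toNat = 2 * (stripB v (p * p)).2.toNat + 1 := by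
          omega
        have hppow : ∀ k : Nat, (p * p) ^ k = p ^ (2 * k) := fun k => by
          rw [mul_pow, two_mul, pow_add]
        rw [hfd, ht]
        conv_lhs => rw [hprod, hq]
        rw [hppow, pow_succ]
        ring
      · rw [hfd]
        rintro ⟨m, rfl⟩
        exact hnd ⟨m, by rw [hq]; ring⟩
    · simp only [if_neg hm2]
      refine ⟨?_, ?_, hpos1, by omega⟩
      · have ht : (2 * (stripB v (p * p)).2).toNat = 2 * (stripB v (p * p)).2.toNat := by omega
        have hppow : ∀ k : Nat, (p * p) ^ k = p ^ (2 * k) := fun k => by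
          rw [mul_pow, two_mul, pow_add]
        rw [ht]
        conv_lhs => rw [hprod]
        rw [hppow]
      · intro hd
        exact hm2 (by rw [pvModP p _ (by omega)]; exact Int.emod_eq_zero_of_dvd hd)
  · rw [stripB_step v p hv hp]
    simp only [if_pos hm]
    refine ⟨by simp, ?_, hv, le_refl 0⟩
    intro hd
    exact hm (by rw [pvModP p v (by omega)]; exact Int.emod_eq_zero_of_dvd hd)
termination_by v.toNat + 1 - p.toNat
decreasing_by
  have hq2 : (p * p).toNat = p.toNat * p.toNat := by rw [Int.toNat_mul] <;> omega
  have hgrow : p.toNat + 2 ≤ p.toNat * p.toNat := by nlinarith [show 2 ≤ p.toNat by omega]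
  omega

-- uniqueness of the factorisation core * p^e with p ∤ core
theorem strip_unique_exp (p c1 c2 : Int) (e1 e2 : Nat) (hp : 2 ≤ p)
    (hd1 : ¬ p ∣ c1) (he : c1 * p ^ e1 = c2 * p ^ e2) (hle : e1 ≤ e2) : e1 = e2 := by
  by_contra hne
  have hk : e2 = (e2 - e1 - 1) + 1 + e1 := by omega
  apply hd1
  have hpe : (p : Int) ^ e1 ≠ 0 := pow_ne_zero _ (by omega)
  have hsplit : (p : Int) ^ e2 = p ^ (e2 - e1 - 1) * p * p ^ e1 := by
    conv_lhs => rw [hk]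
    rw [pow_add, pow_add, pow_one]
  have : c1 * p ^ e1 = (c2 * p ^ (e2 - e1 - 1) * p) * p ^ e1 := by
    rw [he, hsplit]; ring
  have hc : c1 = c2 * p ^ (e2 - e1 - 1) * p := mul_right_cancel₀ hpe this
  exact ⟨c2 * p ^ (e2 - e1 - 1), by rw [hc]; ring⟩

theorem strip_unique (p c1 c2 : Int) (e1 e2 : Nat) (hp : 2 ≤ p)
    (hd1 : ¬ p ∣ c1) (hd2 : ¬ p ∣ c2) (he : c1 * p ^ e1 = c2 * p ^ e2) :
    c1 = c2 ∧ e1 = e2 := by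
  have heq : e1 = e2 := by
    rcases le_total e1 e2 with h | h
    · exact strip_unique_exp p c1 c2 e1 e2 hp hd1 he h
    · exact (strip_unique_exp p c2 c1 e2 e1 hp hd2 he.symm h).symm
  subst heq
  exact ⟨mul_right_cancel₀ (pow_ne_zero _ (show (p:Int) ≠ 0 by omega)) he, rfl⟩

theorem stripB_two (v : Int) (hv : 1 ≤ v) : stripB v 2 = strip2 v := by
  have hb := stripB_char v 2 hv (by norm_num)
  have hs := strip2_spec v hv
  have hsp := strip2_prod v hv
  have hnd2 : ¬ (2:Int) ∣ (strip2 v).1 := fun hd => hs.2 (Int.emod_eq_zero_of_dvd hd)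
  have hu := strip_unique 2 (stripB v 2).1 (strip2 v).1 (stripB v 2).2.toNat (strip2 v).2.toNat
    (by norm_num) hb.2.1 hnd2 (by rw [← hb.1, ← hsp.1])
  have he : (stripB v 2).2 = (strip2 v).2 := by
    have h1 := hb.2.2.2
    have h2 := hsp.2
    have := hu.2
    omega
  exact Prod.ext hu.1 he

theorem stripB_three (v : Int) (hv : 1 ≤ v) : stripB v 3 = strip3 v := by
  have hb := stripB_char v 3 hv (by norm_num)
  have hs := strip3_spec v hv
  have hsp := strip3_prod v hv
  have hnd3 : ¬ (3:Int) ∣ (strip3 v).1 := fun hd => hs.2 (Int.emod_eq_zero_of_dvd hd)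
  have hu := strip_unique 3 (stripB v 3).1 (strip3 v).1 (stripB v 3).2.toNat (strip3 v).2.toNat
    (by norm_num) hb.2.1 hnd3 (by rw [← hb.1, ← hsp.1])
  have he : (stripB v 3).2 = (strip3 v).2 := by
    have h1 := hb.2.2.2
    have h2 := hsp.2
    have := hu.2
    omega
  exact Prod.ext hu.1 he

-- B's per-element core and count, and their agreement with A's (for positive inputs)
def bcoreOf (n : Int) : Int := (stripB (stripB n 2).1 3).1
def bopsOf (n : Int) : Int := (stripB n 2).2 + (stripB (stripB n 2).1 3).2

theorem bcoreOf_eq (n : Int) (hn : 1 ≤ n) : bcoreOf n = coreOf n := by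
  unfold bcoreOf coreOf
  rw [stripB_two n hn, stripB_three (strip2 n).1 (strip2_spec n hn).1]

theorem bopsOf_eq (n : Int) (hn : 1 ≤ n) : bopsOf n = opsOf n := by
  unfold bopsOf opsOf
  rw [stripB_two n hn, stripB_three (strip2 n).1 (strip2_spec n hn).1]

theorem loopB_cons_none (n : Int) (t : List Int) (total : Int) :
    loopB (n :: t) total none = loopB t (total + bopsOf n) (some (bcoreOf n)) := rfl

theorem loopB_cons_some (n : Int) (t : List Int) (total c : Int) :
    loopB (n :: t) total (some c) =
      if bcoreOf n ≠ c then -1 else loopB t (total + bopsOf n) (some c) := rfl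

theorem loopB_eq (t : List Int) : ∀ (total c : Int),
    loopB t total (some c) =
      if ∀ n ∈ t, bcoreOf n = c then total + (t.map bopsOf).sum else -1 := by
  induction t with
  | nil => intro total c; simp [loopB]
  | cons n t ih =>
    intro total c
    rw [loopB_cons_some, ih]
    by_cases hc : bcoreOf n = c
    · rw [if_neg (fun hx => hx hc)]
      by_cases hall : ∀ m ∈ t, bcoreOf m = c
      · have hcons : ∀ m ∈ n :: t, bcoreOf m = c := by
          intro m hm
          rcases List.mem_cons.mp hm with h | h
          · subst h; exact hc
          · exact hall m h
        rw [if_pos hall, if_pos hcons, List.map_cons, List.sum_cons]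
        ring
      · rw [if_neg hall,
          if_neg (fun hforall => hall fun m hm => hforall m (List.mem_cons_of_mem _ hm))]
    · rw [if_pos hc, if_neg (fun h => hc (h n (List.mem_cons_self ..)))]

theorem ofList_all_eq {a : Int} {l : List Int} (h : ∀ x ∈ l, x = a) :
    PySem.Set.ofList (a :: l) = [a] := by
  have key : ∀ l', (∀ x ∈ l', x = a) → List.foldl PySem.Set.add [a] l' = [a] := by
    intro l' h'
    induction l' with
    | nil => rfl
    | cons x t ih =>
      have hx : x = a := h' x (List.mem_cons_self ..)
      subst hx
      have hadd : PySem.Set.add [x] x = [x] := by simp [PySem.Set.add, PySem.Set.contains]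
      rw [List.foldl_cons, hadd]
      exact ih fun y hy => h' y (List.mem_cons_of_mem _ hy)
  simpa [PySem.Set.ofList] using key l h

theorem one_lt_length_of_two_mem {a b : Int} {S : List Int} (ha : a ∈ S) (hb : b ∈ S)
    (hne : a ≠ b) : 1 < S.length := by
  match S with
  | [] => simp at ha
  | [x] => simp at ha hb; omega
  | x :: y :: t => simp

-- ===== VERDICT (by name: the statement is the Claim_ definition above) =====
theorem calculate_operations_spec : Claim_equal_calculate_operations := by
  intro numbers _
  unfold Spec_calculate_operations calculate_operations calculate_operations_alt
  rw [validateA_eq_any]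
  by_cases hbad : numbers.any (fun n => n ≤ 0) = true
  · rw [if_pos hbad, if_pos hbad]
  · rw [if_neg hbad, if_neg hbad]
    have hpos : ∀ n ∈ numbers, 1 ≤ n := by
      intro n hn
      by_contra hc
      exact hbad (List.any_eq_true.mpr ⟨n, hn, by simpa using by omega⟩)
    match numbers, hpos with
    | [], _ => decide
    | n :: t, hpos =>
      have hn1 : 1 ≤ n := hpos n (List.mem_cons_self ..)
      have hmapr : (n :: t).map reduce_value = (n :: t).map opsOf :=
        List.map_congr_left fun m hm => reduce_value_eq m (hpos m hm)
      have hmapc : (n :: t).map redLoop = (n :: t).map coreOf :=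
        List.map_congr_left fun m hm => redLoop_eq m (hpos m hm)
      have hmapb : t.map bopsOf = t.map opsOf :=
        List.map_congr_left fun m hm => bopsOf_eq m (hpos m (List.mem_cons_of_mem _ hm))
      have hbn : bcoreOf n = coreOf n := bcoreOf_eq n hn1
      have hbo : bopsOf n = opsOf n := bopsOf_eq n hn1
      have hiff : (∀ m ∈ t, bcoreOf m = bcoreOf n) ↔ (∀ m ∈ t, coreOf m = coreOf n) := by
        constructor <;> intro h m hm <;>
          have hm1 : 1 ≤ m := hpos m (List.mem_cons_of_mem _ hm)
        · rw [← bcoreOf_eq m hm1, ← hbn]; exact h m hm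
        · rw [bcoreOf_eq m hm1, hbn]; exact h m hm
      simp only [loopA_eq, hmapr, hmapc, List.nil_append]
      rw [loopB_cons_none, loopB_eq]
      by_cases hall : ∀ m ∈ t, coreOf m = coreOf n
      · have hset : PySem.Set.ofList (List.map coreOf (n :: t)) = [coreOf n] := by
          rw [List.map_cons]
          exact ofList_all_eq (by
            intro x hx
            obtain ⟨m, hm, rfl⟩ := List.mem_map.mp hx
            exact hall m hm)
        rw [hset, if_neg (by simp), if_pos (hiff.mpr hall), hmapb, List.map_cons, List.sum_cons,
          hbo]
        ring
      · have hlt : 1 < (PySem.Set.ofList (List.map coreOf (n :: t))).length := by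
          push Not at hall
          obtain ⟨m, hm, hne⟩ := hall
          have hmem1 : coreOf n ∈ PySem.Set.ofList (List.map coreOf (n :: t)) := by
            rw [PySem.Set.mem_ofList]
            simp
          have hmem2 : coreOf m ∈ PySem.Set.ofList (List.map coreOf (n :: t)) := by
            rw [PySem.Set.mem_ofList, List.mem_map]
            exact ⟨m, List.mem_cons_of_mem _ hm, rfl⟩
          exact one_lt_length_of_two_mem hmem2 hmem1 hne
        rw [if_pos hlt, if_neg (fun h => hall (hiff.mp h))]
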